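-- pv_equiv track=rewrite | github.com/vsapronova/Harvard-Projects | dna/dna.py | find_dna
-- ===== SOURCE A (Python) =====
-- def find_dna(dna, list_dna):
--     dict_dna = {}
--     for dna_str in list_dna:
--         start = 0
--         end = 0
--         start_end = ()
--         list_start_end = list()
--         i = 0
--         j = 0
--         while i < len(dna):
--             if dna_str_search(dna, i, dna_str):
--                 start = i
--                 end = i + len(dna_str) - 1
--                 list_start_end.append((start, end))
--                 i += len(dna_str)
--             else:
--                 i += 1
--         result = count_repeats(list_start_end)
--         dict_dna[dna_str] = result
--     return dict_dna
--
-- def dna_str_search(dna, i, dna_str):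
--     for j in range(len(dna_str)):
--         if i + j >= len(dna):
--             return False
--         if dna[i + j] != dna_str[j]:
--             return False
--     return True
--
-- def count_repeats(list_start_end):
--     max_repeats = 0
--
--     current_repeats = 0
--     prev_end = -2
--     for start, end in list_start_end:
--         if start - prev_end == 1:
--             current_repeats += 1
--         else:
--             current_repeats = 1
--         if max_repeats < current_repeats:
--             max_repeats = current_repeats
--         prev_end = end
--     return max_repeats
-- ===== SOURCE B (Python) =====
-- def find_dna(dna, list_dna):
--     n = len(dna)
--     result = {}
--     for s in list_dna:
--         L = len(s)
--         # all (also overlapping) occurrence positions of s, as one table pass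
--         occs = [i for i in range(n) if dna.startswith(s, i)]
--         # dynamic programming right-to-left: run[p] = length of the stride-L chain starting at p
--         run = {}
--         for p in reversed(occs):
--             run[p] = run.get(p + L, 0) + 1
--         # one jump pass over the occurrence list: pick greedy chain heads, skip covered positions
--         best = 0
--         t = 0
--         for p in occs:
--             if p >= t:
--                 r = run[p]
--                 if r > best:
--                     best = r
--                 t = p + L * r
--         result[s] = best
--     return result
-- ===== Notes on version B (the rewrite author's own statement) =====
-- stated objective: faster
-- what changed: A interleaves a char-by-char probe with greedy skipping and then counts adjacency in a list of (start,end) pairs; B instead builds the table of ALL (also overlapping) occurrence positions in one pass, computes each position's stride-length chain by right-to-left dynamic programming in a dict, and extracts A's answer with a single jump pass over the table that picks the greedy chain heads (best = max of their DP values).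
import Mathlib
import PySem

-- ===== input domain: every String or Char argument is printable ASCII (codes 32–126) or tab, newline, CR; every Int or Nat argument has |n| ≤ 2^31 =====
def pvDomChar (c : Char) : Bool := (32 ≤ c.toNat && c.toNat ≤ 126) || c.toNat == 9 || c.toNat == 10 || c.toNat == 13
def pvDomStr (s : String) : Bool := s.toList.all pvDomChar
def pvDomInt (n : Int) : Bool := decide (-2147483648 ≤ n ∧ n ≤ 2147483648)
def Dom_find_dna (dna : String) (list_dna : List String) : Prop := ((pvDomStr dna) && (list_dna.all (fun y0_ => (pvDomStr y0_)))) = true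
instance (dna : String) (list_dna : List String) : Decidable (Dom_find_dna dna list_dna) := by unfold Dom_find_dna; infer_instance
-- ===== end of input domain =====

-- B replaces A's interleaved probe-and-skip scan (with its (start,end) list and second counting
-- pass) by: the table of ALL occurrence positions built in one pass, a right-to-left dynamic
-- programming dict of stride-chain lengths, and a single jump pass picking greedy chain heads.

-- ===== PORT A =====
-- port of dna_str_search's inner `for j in range(len(dna_str))` with its early returns
def searchGo (d s : List Char) (i j : Nat) : Bool :=
  if _h : j < s.length then
    if d.length ≤ i + j then false
    else if d[i + j]? ≠ s[j]? then false
    else searchGo d s i (j + 1)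
  else true
termination_by s.length - j

def dna_str_search (dna : List Char) (i : Nat) (dna_str : List Char) : Bool :=
  searchGo dna dna_str i 0

-- the `while i < len(dna)` loop of A; fuel = len(dna)+1 suffices whenever dna_str ≠ ""
-- (with dna_str = "" and dna ≠ "" the Python loop never terminates — excluded by Pre_)
def findLoopA (d s : List Char) (i : Nat) (acc : List (Int × Int)) (fuel : Nat) : List (Int × Int) :=
  match fuel with
  | 0 => acc
  | fuel + 1 =>
    if i < d.length then
      if dna_str_search d i s then
        findLoopA d s (i + s.length) (acc ++ [((i : Int), (i : Int) + (s.length : Int) - 1)]) fuel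
      else
        findLoopA d s (i + 1) acc fuel
    else acc

def count_repeats (l : List (Int × Int)) : Int :=
  (l.foldl (fun (st : Int × Int × Int) (se : Int × Int) =>
      let cur := if se.1 - st.2.2 == 1 then st.2.1 + 1 else (1 : Int)
      let mx := if st.1 < cur then cur else st.1
      (mx, cur, se.2)) ((0 : Int), (0 : Int), (-2 : Int))).1

def find_dna (dna : String) (list_dna : List String) : List (String × Int) :=
  (list_dna.foldl (fun (dd : PySem.Dict String Int) (s : String) =>
      dd.insert s (count_repeats
        (findLoopA dna.toList s.toList 0 [] (dna.toList.length + 1))))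
    PySem.Dict.empty).items

-- ===== PORT B =====
def find_dna_alt (dna : String) (list_dna : List String) : List (String × Int) :=
  let n := PySem.Str.len dna
  (list_dna.foldl (fun (dd : PySem.Dict String Int) (s : String) =>
      let L := PySem.Str.len s
      -- dna.startswith(s, i): exact for the 0 ≤ i < n produced by range(n)
      let occs := (PySem.List.pyRange 0 n 1).filter
        (fun i => PySem.Chars.startswith (dna.toList.drop i.toNat) s.toList)
      let run := occs.reverse.foldl
        (fun (run : PySem.Dict Int Int) p => run.insert p (run.getD (p + L) 0 + 1))
        PySem.Dict.empty
      let bt := occs.foldl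
        (fun (bt : Int × Int) p =>
          if bt.2 ≤ p then
            let r := run.getD p 0   -- run[p]: the key p was inserted by the loop above
            ((if bt.1 < r then r else bt.1), p + L * r)
          else bt)
        ((0 : Int), (0 : Int))
      dd.insert s bt.1)
    PySem.Dict.empty).items

-- ===== PRECONDITION & SPEC =====
-- Pre_ excludes an empty STR string together with a nonempty dna: there Python A's while loop
-- never advances (i += 0) and diverges, so A returns on no such input.
def Pre_find_dna (dna : String) (list_dna : List String) : Prop :=
  "" ∉ list_dna ∨ dna = ""
instance (dna : String) (list_dna : List String) : Decidable (Pre_find_dna dna list_dna) := by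
  unfold Pre_find_dna; infer_instance

def pvWitness_find_dna : String × List String := ("AGATAGATGAAT", ["AGAT", "AATG", "GA"])

def Spec_find_dna (dna : String) (list_dna : List String) (out : List (String × Int)) : Prop :=
  out = find_dna_alt dna list_dna
instance (dna : String) (list_dna : List String) (out : List (String × Int)) :
    Decidable (Spec_find_dna dna list_dna out) := by unfold Spec_find_dna; infer_instance

-- ===== CLAIM (what is proved, stated in full; the proofs are below) =====
def Claim_equal_find_dna : Prop := ∀ (dna : String) (list_dna : List String),
  Dom_find_dna dna list_dna → Pre_find_dna dna list_dna →
  Spec_find_dna dna list_dna (find_dna dna list_dna)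

-- ===== LEMMAS AND PROOFS =====

-- the greedy sequence of match positions A's loop follows, as a reference function
def greedyPos (d s : List Char) (k : Nat) : List Nat :=
  if _h : k < d.length then
    if s.isPrefixOf (d.drop k) then k :: greedyPos d s (k + max s.length 1)
    else greedyPos d s (k + 1)
  else []
termination_by d.length - k

-- the chain-counting fold along a match-position sequence (reference device)
def chainFold (L : Nat) : List Nat → Int → Int → Option Int → Int
  | [], _, best, _ => best
  | p :: ps, cur, best, expect =>
    let cur' := if some ((p : Int)) == expect then cur + 1 else 1
    let best' := if cur' > best then cur' else best
    chainFold L ps cur' best' (some ((p : Int) + (L : Int)))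

-- the (start, end) pair A records for a match at position p
def pairOf (L p : Nat) : Int × Int := ((p : Int), (p : Int) + (L : Int) - 1)

lemma prefix_drop_bound (d s : List Char) (hs : s ≠ []) (p : Nat) (hp : s <+: d.drop p) :
    p + s.length ≤ d.length := by
  have h1 := hp.length_le
  have h2 : 0 < s.length := List.length_pos_of_ne_nil hs
  simp only [List.length_drop] at h1
  omega

-- B's DP value: length of the stride-|s| chain of matches starting at p
def runF (d s : List Char) (p : Nat) : Int :=
  if h : p < d.length ∧ s ≠ [] ∧ s.isPrefixOf (d.drop p) then runF d s (p + s.length) + 1 else 0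
termination_by d.length - p
decreasing_by
  have hpre := List.isPrefixOf_iff_prefix.mp h.2.2
  have := prefix_drop_bound d s h.2.1 p hpre
  have := List.length_pos_of_ne_nil h.2.1
  omega

-- all occurrence positions ≥ a, ascending (reference form of B's occurrence table)
def occsFrom (d s : List Char) (a : Nat) : List Nat :=
  if _h : a < d.length then
    (if PySem.Chars.startswith (d.drop a) s then a :: occsFrom d s (a + 1) else occsFrom d s (a + 1))
  else []
termination_by d.length - a

-- B's jump pass, over the Nat-level occurrence list with the DP dict replaced by runF
def jumpF (d s : List Char) (bt : Int × Int) (q : Nat) : Int × Int :=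
  if bt.2 ≤ (q : Int) then
    ((if bt.1 < runF d s q then runF d s q else bt.1),
      (q : Int) + (s.length : Int) * runF d s q)
  else bt

lemma searchGo_correct (d s : List Char) (i : Nat) :
    ∀ j, searchGo d s i j = true ↔ s.drop j <+: d.drop (i + j) := by
  intro j
  generalize hm : s.length - j = m
  induction m generalizing j with
  | zero =>
    have hj : s.length ≤ j := by omega
    rw [searchGo]
    simp [Nat.not_lt.mpr hj, List.drop_eq_nil_of_le hj]
  | succ m ih =>
    have hj : j < s.length := by omega
    rw [searchGo]
    simp only [hj, dif_pos]
    by_cases hd : d.length ≤ i + j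
    · have h1 : s.drop j ≠ [] := by
        intro h; have := congrArg List.length h; simp at this; omega
      simp [hd, List.drop_eq_nil_of_le hd, h1, List.prefix_nil]
    · have hd' : i + j < d.length := by omega
      simp only [hd, if_false]
      rw [List.drop_eq_getElem_cons hj, List.drop_eq_getElem_cons hd',
        List.cons_prefix_cons]
      have hg1 : d[i + j]? = some d[i + j] := List.getElem?_eq_getElem hd'
      have hg2 : s[j]? = some s[j] := List.getElem?_eq_getElem hj
      by_cases hc : d[i + j] = s[j]
      · have : ¬ d[i + j]? ≠ s[j]? := by simp [hg1, hg2, hc]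
        rw [if_neg this]
        have := ih (j + 1) (by omega)
        rw [this]
        constructor
        · intro h; exact ⟨hc.symm, by simpa [Nat.add_assoc] using h⟩
        · intro h; simpa [Nat.add_assoc] using h.2
      · have : d[i + j]? ≠ s[j]? := by simp [hg1, hg2, hc]
        rw [if_pos this]
        constructor
        · intro h; exact absurd h (by simp)
        · intro h; exact absurd h.1.symm hc

lemma loopA_eq_greedy (d s : List Char) (hs : s ≠ []) :
    ∀ fuel k acc, d.length + 1 - k ≤ fuel →
    findLoopA d s k acc fuel = acc ++ (greedyPos d s k).map (pairOf s.length) := by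
  have hsl : 0 < s.length := List.length_pos_of_ne_nil hs
  intro fuel
  induction fuel with
  | zero =>
    intro k acc hf
    rw [findLoopA, greedyPos]
    simp [show ¬ k < d.length by omega]
  | succ fuel ih =>
    intro k acc hf
    rw [findLoopA]
    by_cases hk : k < d.length
    · simp only [hk, if_true]
      by_cases hmt : dna_str_search d k s
      · have hpre : s <+: d.drop k := by
          have := (searchGo_correct d s k 0).mp hmt
          simpa using this
        rw [greedyPos]
        simp only [hk, dif_pos, List.isPrefixOf_iff_prefix.mpr hpre, if_true, hmt]
        rw [ih (k + s.length) _ (by omega), Nat.max_eq_left hsl]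
        simp [pairOf, List.append_assoc]
      · have hnpre : ¬ s <+: d.drop k := by
          intro h
          exact hmt ((searchGo_correct d s k 0).mpr (by simpa using h))
        rw [greedyPos]
        simp only [hk, dif_pos, show ¬ s.isPrefixOf (d.drop k) from
          fun h => hnpre (List.isPrefixOf_iff_prefix.mp h), hmt]
        exact ih (k + 1) acc (by omega)
    · rw [greedyPos]
      simp [hk]

lemma countFold_eq_chainFold (L : Nat) :
    ∀ (ps : List Nat) (mx cur prev : Int) (expect : Option Int),
    ((expect = none ∧ prev = -2) ∨ expect = some (prev + 1)) →
    ((ps.map (pairOf L)).foldl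
        (fun (st : Int × Int × Int) (se : Int × Int) =>
          let cur := if se.1 - st.2.2 == 1 then st.2.1 + 1 else (1 : Int)
          let mx := if st.1 < cur then cur else st.1
          (mx, cur, se.2)) (mx, cur, prev)).1
      = chainFold L ps cur mx expect := by
  intro ps
  induction ps with
  | nil => intro mx cur prev expect _; rfl
  | cons p ps ih =>
    intro mx cur prev expect hrel
    simp only [List.map_cons, List.foldl_cons, chainFold, pairOf]
    have htest : ((p : Int) - prev == 1) = (some ((p : Int)) == expect) := by
      rw [Bool.eq_iff_iff]
      rcases hrel with ⟨hn, hp2⟩ | hsome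
      · subst hn; subst hp2
        simp only [beq_iff_eq]
        constructor
        · intro h; omega
        · intro h; simp at h
      · subst hsome
        simp only [beq_iff_eq, Option.some.injEq]
        constructor
        · intro h; omega
        · intro h; omega
    rw [htest]
    have hrel' : ((some ((p : Int) + (L : Int)) : Option Int) = none ∧
          (p : Int) + (L : Int) - 1 = -2) ∨
        (some ((p : Int) + (L : Int)) : Option Int)
          = some (((p : Int) + (L : Int) - 1) + 1) := by
      right; congr 1; ring
    have := ih (if mx < (if some ((p:Int)) == expect then cur + 1 else 1)
        then (if some ((p:Int)) == expect then cur + 1 else 1) else mx)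
      (if some ((p:Int)) == expect then cur + 1 else 1)
      ((p : Int) + (L : Int) - 1) (some ((p : Int) + (L : Int))) hrel'
    simpa [gt_iff_lt] using this

lemma runF_nonneg (d s : List Char) (p : Nat) : 0 ≤ runF d s p := by
  have H : ∀ m p, d.length - p ≤ m → 0 ≤ runF d s p := by
    intro m
    induction m with
    | zero =>
      intro p hm
      rw [runF]
      split_ifs with h
      · exact absurd h.1 (by omega)
      · exact le_refl 0
    | succ m ih =>
      intro p hm
      rw [runF]
      split_ifs with h
      · have hpre := List.isPrefixOf_iff_prefix.mp h.2.2
        have hb := prefix_drop_bound d s h.2.1 p hpre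
        have hsl := List.length_pos_of_ne_nil h.2.1
        have := ih (p + s.length) (by omega)
        omega
      · exact le_refl 0
  exact H (d.length - p) p (le_refl _)

lemma runF_stop (d s : List Char) (hs : s ≠ []) (p : Nat) :
    ¬ ((p + (runF d s p).toNat * s.length) < d.length ∧
       s <+: d.drop (p + (runF d s p).toNat * s.length)) := by
  have H : ∀ m p, d.length - p ≤ m →
      ¬ ((p + (runF d s p).toNat * s.length) < d.length ∧
         s <+: d.drop (p + (runF d s p).toNat * s.length)) := by
    intro m
    induction m with
    | zero =>
      intro p hm
      rw [runF]
      split_ifs with h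
      · exact absurd h.1 (by omega)
      · simp only [Int.toNat_zero, Nat.zero_mul, Nat.add_zero]
        intro hc
        exact h ⟨hc.1, hs, List.isPrefixOf_iff_prefix.mpr hc.2⟩
    | succ m ih =>
      intro p hm
      rw [runF]
      split_ifs with h
      · have hpre := List.isPrefixOf_iff_prefix.mp h.2.2
        have hb := prefix_drop_bound d s h.2.1 p hpre
        have hsl := List.length_pos_of_ne_nil h.2.1
        have hnn := runF_nonneg d s (p + s.length)
        have htn : (runF d s (p + s.length) + 1).toNat = (runF d s (p + s.length)).toNat + 1 := by
          omega
        rw [htn]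
        have harith : p + ((runF d s (p + s.length)).toNat + 1) * s.length
            = (p + s.length) + (runF d s (p + s.length)).toNat * s.length := by ring
        rw [harith]
        exact ih (p + s.length) (by omega)
      · simp only [Int.toNat_zero, Nat.zero_mul, Nat.add_zero]
        intro hc
        exact h ⟨hc.1, hs, List.isPrefixOf_iff_prefix.mpr hc.2⟩
  exact H (d.length - p) p (le_refl _)

lemma mem_occsFrom (d s : List Char) :
    ∀ m a q, d.length - a ≤ m → q ∈ occsFrom d s a →
    a ≤ q ∧ q < d.length ∧ s <+: d.drop q := by
  intro m
  induction m with
  | zero =>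
    intro a q hm hq
    rw [occsFrom] at hq
    simp [show ¬ a < d.length by omega] at hq
  | succ m ih =>
    intro a q hm hq
    rw [occsFrom] at hq
    by_cases ha : a < d.length
    · simp only [ha, dif_pos] at hq
      by_cases hsw : PySem.Chars.startswith (d.drop a) s
      · rw [if_pos hsw] at hq
        rcases List.mem_cons.mp hq with h | h
        · rw [h]
          exact ⟨le_refl a, ha, (PySem.Chars.startswith_iff _ _).mp hsw⟩
        · have := ih (a + 1) q (by omega) h
          exact ⟨by omega, this.2⟩
      · rw [if_neg hsw] at hq
        have := ih (a + 1) q (by omega) hq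
        exact ⟨by omega, this.2⟩
    · simp [ha] at hq

lemma range_filter_eq_occsFrom (d s : List Char) :
    ∀ m (a : Nat), d.length - a ≤ m →
    (PySem.List.pyRange (a : Int) ((d.length : Nat) : Int) 1).filter
        (fun i => PySem.Chars.startswith (d.drop i.toNat) s)
      = (occsFrom d s a).map (fun q => ((q : Nat) : Int)) := by
  intro m
  induction m with
  | zero =>
    intro a hm
    rw [occsFrom]
    have ha : ¬ a < d.length := by omega
    rw [PySem.List.pyRange_one_eq_nil (by exact_mod_cast Nat.le_of_not_lt ha)]
    simp [ha]
  | succ m ih =>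
    intro a hm
    by_cases ha : a < d.length
    · rw [PySem.List.pyRange_one_cons (by exact_mod_cast ha)]
      rw [occsFrom]
      simp only [ha, dif_pos]
      rw [List.filter_cons]
      have hcast : ((a : Nat) : Int) + 1 = (((a + 1 : Nat)) : Int) := by push_cast; ring
      have htn : ((a : Nat) : Int).toNat = a := Int.toNat_natCast a
      by_cases hsw : PySem.Chars.startswith (d.drop a) s
      · simp only [htn, hsw, if_pos, List.map_cons]
        rw [hcast, ih (a + 1) (by omega)]
      · simp only [htn, hsw]
        rw [if_neg (by simp), hcast, ih (a + 1) (by omega)]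
        simp
    · rw [occsFrom]
      rw [PySem.List.pyRange_one_eq_nil (by exact_mod_cast Nat.le_of_not_lt ha)]
      simp [ha]

lemma dict_getD_eq_runF (d s : List Char) (hs : s ≠ []) :
    ∀ m (a : Nat), d.length - a ≤ m → ∀ q : Nat,
    (((occsFrom d s a).foldr
        (fun (q : Nat) (dct : PySem.Dict Int Int) =>
          dct.insert ((q : Nat) : Int) (dct.getD (((q : Nat) : Int) + (s.length : Int)) 0 + 1))
        PySem.Dict.empty).getD ((q : Nat) : Int) 0)
      = if a ≤ q ∧ q < d.length ∧ s <+: d.drop q then runF d s q else 0 := by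
  have hL := List.length_pos_of_ne_nil hs
  intro m
  induction m with
  | zero =>
    intro a hm q
    rw [occsFrom]
    rw [dif_neg (show ¬ a < d.length by omega)]
    rw [if_neg (by rintro ⟨h1, h2, -⟩; omega)]
    simp [PySem.Dict.getD_empty]
  | succ m ih =>
    intro a hm q
    by_cases ha : a < d.length
    · rw [occsFrom]
      rw [dif_pos ha]
      by_cases hsw : PySem.Chars.startswith (d.drop a) s
      · have hpre : s <+: d.drop a := (PySem.Chars.startswith_iff _ _).mp hsw
        rw [if_pos hsw]
        simp only [List.foldr_cons]
        rw [PySem.Dict.getD_insert]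
        by_cases hqa : ((q : Nat) : Int) = ((a : Nat) : Int)
        · have hq : q = a := by exact_mod_cast hqa
          subst hq
          rw [if_pos hqa]
          have hcast : ((q : Nat) : Int) + ((s.length : Nat) : Int)
              = (((q + s.length : Nat)) : Int) := by push_cast; ring
          rw [hcast, ih (q + 1) (by omega) (q + s.length)]
          have hinner : (if q + 1 ≤ q + s.length ∧ q + s.length < d.length ∧
                s <+: d.drop (q + s.length) then runF d s (q + s.length) else 0)
              = runF d s (q + s.length) := by
            split_ifs with hc
            · rfl
            · symm
              rw [runF, dif_neg (by
                rintro ⟨h1, -, h3⟩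
                exact hc ⟨by omega, h1, List.isPrefixOf_iff_prefix.mp h3⟩)]
          rw [hinner, if_pos ⟨le_refl q, ha, hpre⟩]
          conv_rhs => rw [runF, dif_pos ⟨ha, hs, List.isPrefixOf_iff_prefix.mpr hpre⟩]
        · have hq : q ≠ a := fun h => hqa (by exact_mod_cast h)
          rw [if_neg hqa, ih (a + 1) (by omega) q]
          split_ifs with h1 h2 h2
          · rfl
          · obtain ⟨ha1, hb1, hc1⟩ := h1
            exact absurd ⟨by omega, hb1, hc1⟩ h2
          · obtain ⟨ha2, hb2, hc2⟩ := h2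
            exact absurd ⟨by omega, hb2, hc2⟩ h1
          · rfl
      · rw [if_neg hsw, ih (a + 1) (by omega) q]
        split_ifs with h1 h2 h2
        · rfl
        · obtain ⟨ha1, hb1, hc1⟩ := h1
          exact absurd ⟨by omega, hb1, hc1⟩ h2
        · obtain ⟨ha2, hb2, hc2⟩ := h2
          by_cases hq2 : a + 1 ≤ q
          · exact absurd ⟨hq2, hb2, hc2⟩ h1
          · have hq : q = a := by omega
            subst hq
            exact absurd ((PySem.Chars.startswith_iff _ _).mpr hc2) hsw
        · rfl
    · rw [occsFrom]
      rw [dif_neg ha]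
      rw [if_neg (by rintro ⟨h1, h2, -⟩; omega)]
      simp [PySem.Dict.getD_empty]

lemma jump_skip (d s : List Char) :
    ∀ m (a b : Nat), b - a ≤ m → a ≤ b → ∀ X : Int,
    (occsFrom d s a).foldl (jumpF d s) (X, ((b : Nat) : Int))
      = (occsFrom d s b).foldl (jumpF d s) (X, ((b : Nat) : Int)) := by
  intro m
  induction m with
  | zero =>
    intro a b hm hab X
    have : a = b := by omega
    rw [this]
  | succ m ih =>
    intro a b hm hab X
    by_cases heq : a = b
    · rw [heq]
    · have halt : a < b := by omega
      by_cases ha : a < d.length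
      · conv_lhs => rw [occsFrom]
        rw [dif_pos ha]
        by_cases hsw : PySem.Chars.startswith (d.drop a) s
        · rw [if_pos hsw]
          simp only [List.foldl_cons]
          rw [show jumpF d s (X, ((b : Nat) : Int)) a = (X, ((b : Nat) : Int)) from by
            rw [jumpF, if_neg]; simp only []; exact_mod_cast Nat.not_le.mpr halt]
          exact ih (a + 1) b (by omega) (by omega) X
        · rw [if_neg hsw]
          exact ih (a + 1) b (by omega) (by omega) X
      · have hb : ¬ b < d.length := by omega
        conv_lhs => rw [occsFrom]
        conv_rhs => rw [occsFrom]
        rw [dif_neg ha, dif_neg hb]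

lemma if_gt_eq_max (a b : Int) : (if a > b then a else b) = max b a := by
  rw [max_def]; split_ifs <;> omega

lemma if_lt_eq_max (a b : Int) : (if a < b then b else a) = max a b := by
  rw [max_def]; split_ifs <;> omega

lemma chain_unroll (d s : List Char) (hs : s ≠ []) :
    ∀ m (p : Nat) (c best : Int), d.length - p ≤ m →
    p < d.length → s <+: d.drop p →
    chainFold s.length (greedyPos d s p) c best (some ((p : Nat) : Int))
      = chainFold s.length (greedyPos d s (p + (runF d s p).toNat * s.length))
          (c + runF d s p) (max best (c + runF d s p))
          (some (((p + (runF d s p).toNat * s.length : Nat) : Int))) := by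
  have hsl : 0 < s.length := List.length_pos_of_ne_nil hs
  intro m
  induction m with
  | zero => intro p c best hm hp hpre; omega
  | succ m ih =>
    intro p c best hm hp hpre
    have hstep : greedyPos d s p = p :: greedyPos d s (p + s.length) := by
      rw [greedyPos, dif_pos hp, if_pos (List.isPrefixOf_iff_prefix.mpr hpre),
        Nat.max_eq_left hsl]
    rw [hstep]
    simp only [chainFold, beq_self_eq_true, if_true]
    rw [if_gt_eq_max]
    have hr : runF d s p = runF d s (p + s.length) + 1 := by
      rw [runF, dif_pos ⟨hp, hs, List.isPrefixOf_iff_prefix.mpr hpre⟩]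
    by_cases hq : p + s.length < d.length ∧ s <+: d.drop (p + s.length)
    · obtain ⟨h1, h2⟩ := hq
      have hc1 : ((p : Nat) : Int) + ((s.length : Nat) : Int)
          = (((p + s.length : Nat)) : Int) := by push_cast; ring
      rw [hc1, ih (p + s.length) (c + 1) (max best (c + 1)) (by omega) h1 h2]
      have hnn := runF_nonneg d s (p + s.length)
      have htn : (runF d s p).toNat = (runF d s (p + s.length)).toNat + 1 := by
        rw [hr]; omega
      have harith : p + (runF d s p).toNat * s.length
          = (p + s.length) + (runF d s (p + s.length)).toNat * s.length := by
        rw [htn]; ring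
      have hcsum : c + runF d s p = (c + 1) + runF d s (p + s.length) := by rw [hr]; ring
      have hmax : max (max best (c + 1)) ((c + 1) + runF d s (p + s.length))
          = max best (c + runF d s p) := by
        rw [hcsum, max_assoc, max_eq_right (by omega : (c + 1) ≤ (c + 1) + runF d s (p + s.length))]
      rw [harith, hcsum, hmax, hcsum]
    · have hr0 : runF d s (p + s.length) = 0 := by
        rw [runF, dif_neg (by
          rintro ⟨hh1, -, hh3⟩
          exact hq ⟨hh1, List.isPrefixOf_iff_prefix.mp hh3⟩)]
      have hr1 : runF d s p = 1 := by rw [hr, hr0]; norm_num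
      rw [hr1]
      norm_num

lemma bridge (d s : List Char) (hs : s ≠ []) :
    ∀ m (t tp : Nat) (c best : Int) (expect : Option Int), d.length - t ≤ m → tp ≤ t →
    (expect = none ∨ (expect = some ((tp : Nat) : Int) ∧
      ¬ (tp < d.length ∧ s <+: d.drop tp))) →
    chainFold s.length (greedyPos d s t) c best expect
      = ((occsFrom d s t).foldl (jumpF d s) (best, ((tp : Nat) : Int))).1 := by
  have hsl : 0 < s.length := List.length_pos_of_ne_nil hs
  intro m
  induction m with
  | zero =>
    intro t tp c best expect hm htp hstale
    have ht : ¬ t < d.length := by omega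
    rw [greedyPos, dif_neg ht, occsFrom, dif_neg ht]
    rfl
  | succ m ih =>
    intro t tp c best expect hm htp hstale
    by_cases ht : t < d.length
    · by_cases hsw : PySem.Chars.startswith (d.drop t) s
      · have hpre : s <+: d.drop t := (PySem.Chars.startswith_iff _ _).mp hsw
        have hr : runF d s t = runF d s (t + s.length) + 1 := by
          rw [runF, dif_pos ⟨ht, hs, List.isPrefixOf_iff_prefix.mpr hpre⟩]
        have hnn := runF_nonneg d s (t + s.length)
        have hrt1 : 1 ≤ runF d s t := by omega
        -- the step the chainFold side takes at the head t (a chain reset)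
        have hne : (some ((t : Nat) : Int) == expect) = false := by
          rcases hstale with h | ⟨h, hocc⟩
          · subst h; rfl
          · subst h
            have htpt : tp ≠ t := fun he => hocc (by rw [he]; exact ⟨ht, hpre⟩)
            simp only [beq_eq_false_iff_ne, ne_eq, Option.some.injEq]
            exact fun he => htpt (by exact_mod_cast he.symm)
        have hgstep : greedyPos d s t = t :: greedyPos d s (t + s.length) := by
          rw [greedyPos, dif_pos ht, if_pos (List.isPrefixOf_iff_prefix.mpr hpre),
            Nat.max_eq_left hsl]
        have hstep2 : chainFold s.length (greedyPos d s t) 0 best (some ((t : Nat) : Int))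
            = chainFold s.length (greedyPos d s (t + s.length)) 1
                (if (1 : Int) > best then 1 else best)
                (some (((t : Nat) : Int) + ((s.length : Nat) : Int))) := by
          rw [hgstep]
          simp only [chainFold, beq_self_eq_true, if_true]
          norm_num
        have hlhs : chainFold s.length (greedyPos d s t) c best expect
            = chainFold s.length (greedyPos d s t) 0 best (some ((t : Nat) : Int)) := by
          rw [hstep2, hgstep]
          simp only [chainFold, hne, Bool.false_eq_true, if_false]
        rw [hlhs]
        -- unroll the whole chain starting at t
        rw [chain_unroll d s hs d.length t 0 best (by omega) ht hpre]
        have hzero : (0 : Int) + runF d s t = runF d s t := by ring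
        rw [hzero]
        -- apply the induction hypothesis at the chain's stop point
        set t' := t + (runF d s t).toNat * s.length with ht'
        have htt' : t + 1 ≤ t' := by
          have : 1 ≤ (runF d s t).toNat := by omega
          have := Nat.mul_le_mul_right s.length this
          omega
        rw [ih t' t' (runF d s t) (max best (runF d s t)) (some ((t' : Nat) : Int))
          (by omega) (le_refl t') (Or.inr ⟨rfl, runF_stop d s hs t⟩)]
        -- now compute the fold side's head step
        conv_rhs => rw [occsFrom, dif_pos ht, if_pos hsw]
        simp only [List.foldl_cons]
        have hjump : jumpF d s (best, ((tp : Nat) : Int)) t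
            = (max best (runF d s t), ((t' : Nat) : Int)) := by
          rw [jumpF, if_pos (by
            show ((tp : Nat) : Int) ≤ ((t : Nat) : Int)
            exact_mod_cast htp)]
          have e1 : (if best < runF d s t then runF d s t else best)
              = max best (runF d s t) := if_lt_eq_max best (runF d s t)
          have e2 : ((t : Nat) : Int) + ((s.length : Nat) : Int) * runF d s t
              = ((t' : Nat) : Int) := by
            have htnn : ((runF d s t).toNat : Int) = runF d s t :=
              Int.toNat_of_nonneg (by omega)
            rw [ht']
            push_cast
            rw [htnn]
            ring
          rw [e1, e2]
        rw [hjump]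
        rw [jump_skip d s (t' - (t + 1)) (t + 1) t' (by omega) (by omega)
          (max best (runF d s t))]
      · rw [occsFrom, dif_pos ht, if_neg hsw]
        rw [greedyPos, dif_pos ht, if_neg (fun h =>
          hsw ((PySem.Chars.startswith_iff _ _).mpr (List.isPrefixOf_iff_prefix.mp h)))]
        exact ih (t + 1) tp c best expect (by omega) (by omega) hstale
    · have ht2 : ¬ t < d.length := ht
      rw [greedyPos, dif_neg ht2, occsFrom, dif_neg ht2]
      rfl

-- per-STR equality, nonempty s
lemma per_str_eq (dna s : String) (hs : s ≠ "") :
    count_repeats (findLoopA dna.toList s.toList 0 [] (dna.toList.length + 1))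
      = (let n := PySem.Str.len dna
         let L := PySem.Str.len s
         let occs := (PySem.List.pyRange 0 n 1).filter
           (fun i => PySem.Chars.startswith (dna.toList.drop i.toNat) s.toList)
         let run := occs.reverse.foldl
           (fun (run : PySem.Dict Int Int) p => run.insert p (run.getD (p + L) 0 + 1))
           PySem.Dict.empty
         let bt := occs.foldl
           (fun (bt : Int × Int) p =>
             if bt.2 ≤ p then
               let r := run.getD p 0
               ((if bt.1 < r then r else bt.1), p + L * r)
             else bt)
           ((0 : Int), (0 : Int))
         bt.1) := by
  have hs' : s.toList ≠ [] := by simpa [String.toList_eq_nil_iff] using hs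
  simp only [PySem.Str.len_eq]
  rw [loopA_eq_greedy dna.toList s.toList hs' (dna.toList.length + 1) 0 [] (by omega),
    List.nil_append]
  unfold count_repeats
  rw [countFold_eq_chainFold s.toList.length (greedyPos dna.toList s.toList 0) 0 0 (-2) none
    (Or.inl ⟨rfl, rfl⟩)]
  have hocc := range_filter_eq_occsFrom dna.toList s.toList dna.toList.length 0 (by omega)
  rw [Nat.cast_zero] at hocc
  rw [hocc]
  simp only [List.foldl_reverse, List.foldr_map]
  rw [List.foldl_map]
  have hbr := bridge dna.toList s.toList hs' dna.toList.length 0 0 0 0 none (by omega)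
    (le_refl 0) (Or.inl rfl)
  rw [Nat.cast_zero] at hbr
  rw [hbr]
  apply congrArg Prod.fst
  apply PySem.List.foldl_congr_mem
  intro acc q hq
  obtain ⟨-, hqlt, hqpre⟩ := mem_occsFrom dna.toList s.toList dna.toList.length 0 q
    (by omega) hq
  have hdict := dict_getD_eq_runF dna.toList s.toList hs' dna.toList.length 0 (by omega) q
  rw [if_pos ⟨Nat.zero_le q, hqlt, hqpre⟩] at hdict
  rw [jumpF, hdict]

-- per-STR equality, empty dna (any s)
lemma per_str_eq_empty (s : String) :
    count_repeats (findLoopA "".toList s.toList 0 [] ("".toList.length + 1))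
      = (let n := PySem.Str.len ""
         let L := PySem.Str.len s
         let occs := (PySem.List.pyRange 0 n 1).filter
           (fun i => PySem.Chars.startswith ("".toList.drop i.toNat) s.toList)
         let run := occs.reverse.foldl
           (fun (run : PySem.Dict Int Int) p => run.insert p (run.getD (p + L) 0 + 1))
           PySem.Dict.empty
         let bt := occs.foldl
           (fun (bt : Int × Int) p =>
             if bt.2 ≤ p then
               let r := run.getD p 0
               ((if bt.1 < r then r else bt.1), p + L * r)
             else bt)
           ((0 : Int), (0 : Int))
         bt.1) := by
  simp only [PySem.Str.len_eq]
  rw [findLoopA]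
  norm_num [count_repeats, PySem.List.pyRange_one_eq_nil]

-- ===== VERDICT (by name: the statement is the Claim_ definition above) =====
theorem find_dna_spec : Claim_equal_find_dna := by
  intro dna list_dna _hdom hpre
  unfold Spec_find_dna find_dna find_dna_alt
  rcases hpre with hni | hempty
  · exact congrArg PySem.Dict.items (PySem.List.foldl_congr_mem _ _ _ _
      (fun dd s hmem => congrArg (dd.insert s)
        (per_str_eq dna s (fun he => hni (he ▸ hmem)))))
  · subst hempty
    exact congrArg PySem.Dict.items (PySem.List.foldl_congr_mem _ _ _ _
      (fun dd s hmem => congrArg (dd.insert s) (per_str_eq_empty s)))
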